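-- pv_equiv track=rewrite | github.com/antoninparrot/Get-images-url-from-google-image | first_images_google.py | sanatize
-- ===== SOURCE A (Python) =====
-- def trouve(mot,phrase):
-- 	#Return the list of indices of mot found in the phrase
-- 	indices = []
-- 	i = 0
-- 	while(i < len(phrase)):
-- 		if mot in phrase[i:]:
-- 			indices.append(phrase[i:].index(mot) + i)
-- 			i = indices[-1] + 1
-- 		else:
-- 			break
-- 	return indices
--
-- def sanatize(liste_indice,result):
-- 	list_url = []
-- 	for i in liste_indice:
-- 		try:
-- 			indice_debut = trouve('["http',result[i-200:i])[-1] + i - 200 + 2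
-- 			indice_fin = trouve('"',result[i:i+5])[0] + i
-- 			if result[indice_debut:indice_fin] != '':
-- 				list_url.append(result[indice_debut:indice_fin])
-- 		except:
-- 			None
--
-- 	return list_url
-- ===== SOURCE B (Python) =====
-- def sanatize(liste_indice, result):
--     # Simpler: no trouve helper / no list of all occurrences -- rindex gives the last
--     # match, index the first, inside the same try; behaviour is identical (both
--     # ValueError and A's IndexError were swallowed by A's bare except).
--     list_url = []
--     for i in liste_indice:
--         try:
--             indice_debut = result[i-200:i].rindex('["http') + i - 200 + 2
--             indice_fin = result[i:i+5].index('"') + i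
--             url = result[indice_debut:indice_fin]
--             if url != '':
--                 list_url.append(url)
--         except ValueError:
--             pass
--     return list_url
-- ===== Notes on version B (the rewrite author's own statement) =====
-- stated objective: simpler
-- what changed: Removed the trouve helper entirely: instead of a while-loop that enumerates every occurrence of the pattern and then takes the last/first element, B asks rindex/index directly for the last/first match inside the same try (ValueError replaces A's swallowed IndexError).
import Mathlib
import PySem

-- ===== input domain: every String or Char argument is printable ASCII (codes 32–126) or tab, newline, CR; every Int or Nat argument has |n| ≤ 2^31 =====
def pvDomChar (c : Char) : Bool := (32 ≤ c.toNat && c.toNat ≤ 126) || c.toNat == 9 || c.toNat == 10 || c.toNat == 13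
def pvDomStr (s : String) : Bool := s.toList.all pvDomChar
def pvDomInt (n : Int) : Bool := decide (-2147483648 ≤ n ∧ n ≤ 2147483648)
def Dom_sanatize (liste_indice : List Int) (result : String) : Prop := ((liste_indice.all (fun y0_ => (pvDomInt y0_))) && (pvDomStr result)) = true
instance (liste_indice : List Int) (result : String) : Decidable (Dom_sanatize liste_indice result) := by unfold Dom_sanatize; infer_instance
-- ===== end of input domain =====

-- B drops the `trouve` all-occurrences loop and uses rindex/index (last/first match)
-- directly; same return value on every input (simpler, not claimed faster).

-- ===== PORT A =====
-- trouve's while-loop: phrase[i:] is List.drop i (i starts at 0 and only grows),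
-- 'mot in phrase[i:]' is Chars.isIn, '.index(mot)' is Chars.find (≥ 0 when isIn holds).
def trouveLoop (mot phrase : List Char) (i : Nat) (indices : List Nat) : List Nat :=
  if _h : i < phrase.length then
    if PySem.Chars.isIn mot (phrase.drop i) then
      trouveLoop mot phrase ((PySem.Chars.find (phrase.drop i) mot).toNat + i + 1)
        (indices ++ [(PySem.Chars.find (phrase.drop i) mot).toNat + i])
    else indices
  else indices
termination_by phrase.length - i
decreasing_by omega

def trouve (mot phrase : List Char) : List Nat := trouveLoop mot phrase 0 []

-- the try/except: [-1] on [] (resp. [0] on []) raises and the bare except skips the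
-- iteration, hence the `match … with | none => acc`.
def sanatize (liste_indice : List Int) (result : String) : List String :=
  liste_indice.foldl (fun acc i =>
    match (trouve (['[', '\"', 'h', 't', 't', 'p']) (PySem.List.slice result.toList (some (i - 200)) (some i))).getLast? with
    | none => acc
    | some d =>
      let indice_debut : Int := (d : Int) + i - 200 + 2
      match (trouve (['\"']) (PySem.List.slice result.toList (some i) (some (i + 5)))).head? with
      | none => acc
      | some f =>
        let indice_fin : Int := (f : Int) + i
        let url := PySem.List.slice result.toList (some indice_debut) (some indice_fin)
        if url ≠ [] then acc ++ [String.ofList url] else acc) []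

-- ===== PORT B =====
-- Source B: rindex is Chars.rfind (-1 = ValueError, caught), index is Chars.find.
def sanatize_alt (liste_indice : List Int) (result : String) : List String :=
  liste_indice.foldl (fun acc i =>
    let r := PySem.Chars.rfind (PySem.List.slice result.toList (some (i - 200)) (some i)) (['[', '\"', 'h', 't', 't', 'p'])
    if r = -1 then acc
    else
      let indice_debut : Int := r + i - 200 + 2
      let f := PySem.Chars.find (PySem.List.slice result.toList (some i) (some (i + 5))) (['\"'])
      if f = -1 then acc
      else
        let indice_fin : Int := f + i
        let url := PySem.List.slice result.toList (some indice_debut) (some indice_fin)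
        if url ≠ [] then acc ++ [String.ofList url] else acc) []

-- ===== PRECONDITION & SPEC =====
def Spec_sanatize (liste_indice : List Int) (result : String) (out : List String) : Prop := out = sanatize_alt liste_indice result
instance (liste_indice : List Int) (result : String) (out : List String) : Decidable (Spec_sanatize liste_indice result out) := by unfold Spec_sanatize; infer_instance

-- ===== CLAIM (what is proved, stated in full; the proofs are below) =====
def Claim_equal_sanatize : Prop := ∀ (liste_indice : List Int) (result : String), Dom_sanatize liste_indice result → Spec_sanatize liste_indice result (sanatize liste_indice result)

-- ===== LEMMAS AND PROOFS =====

-- an occurrence of a nonempty mot lies strictly inside s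
lemma occ_lt {mot s : List Char} {k : Nat} (h : mot <+: s.drop k) (hm : mot ≠ []) :
    k < s.length := by
  have h1 := h.length_le
  rw [List.length_drop] at h1
  have h2 : 0 < mot.length := List.length_pos_of_ne_nil hm
  omega

-- PySem.Chars.rfind.go scans j, j-1, …, 0 for the last match; no spec lemma ships with
-- the prelude, so we characterise it here.
lemma rfind_go_eq_neg_one (s sub : List Char) :
    ∀ j, (∀ k, k ≤ j → ¬ sub <+: s.drop k) → PySem.Chars.rfind.go s sub j = -1 := by
  intro j
  induction j with
  | zero =>
    intro h
    have h0 : ¬ sub.isPrefixOf s = true := by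
      rw [List.isPrefixOf_iff_prefix]
      simpa using h 0 (le_refl 0)
    simp [PySem.Chars.rfind.go, h0]
  | succ j ih =>
    intro h
    have h0 : ¬ sub.isPrefixOf (s.drop (j + 1)) = true := by
      rw [List.isPrefixOf_iff_prefix]
      exact h (j + 1) (le_refl _)
    simp only [PySem.Chars.rfind.go, h0]
    exact ih (fun k hk => h k (Nat.le_succ_of_le hk))

lemma rfind_go_eq_of (s sub : List Char) (m : Nat) (hp : sub <+: s.drop m) :
    ∀ j, m ≤ j → (∀ k, m < k → k ≤ j → ¬ sub <+: s.drop k) →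
    PySem.Chars.rfind.go s sub j = (m : Int) := by
  intro j
  induction j with
  | zero =>
    intro hmj _
    have hm0 : m = 0 := Nat.le_zero.mp hmj
    subst hm0
    have h0 : sub.isPrefixOf s = true := by
      rw [List.isPrefixOf_iff_prefix]; simpa using hp
    simp [PySem.Chars.rfind.go, h0]
  | succ j ih =>
    intro hmj hmax
    by_cases he : m = j + 1
    · subst he
      have h0 : sub.isPrefixOf (s.drop (j + 1)) = true := by
        rw [List.isPrefixOf_iff_prefix]; exact hp
      simp [PySem.Chars.rfind.go, h0]
    · have hmj' : m ≤ j := by omega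
      have h0 : ¬ sub.isPrefixOf (s.drop (j + 1)) = true := by
        rw [List.isPrefixOf_iff_prefix]
        exact hmax (j + 1) (by omega) (le_refl _)
      simp only [PySem.Chars.rfind.go, h0]
      exact ih hmj' (fun k hk hk' => hmax k hk (Nat.le_succ_of_le hk'))

-- the loop's accumulated list: its last element is the last occurrence ≥ i (if any)
lemma trouveLoop_last (mot s : List Char) (hm : mot ≠ []) :
    ∀ n i acc, s.length - i ≤ n →
      ((trouveLoop mot s i acc).getLast? = acc.getLast? ∧ ∀ k, i ≤ k → ¬ mot <+: s.drop k)
      ∨ (∃ m, mot <+: s.drop m ∧ i ≤ m ∧ (∀ k, m < k → ¬ mot <+: s.drop k) ∧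
          (trouveLoop mot s i acc).getLast? = some m) := by
  intro n
  induction n with
  | zero =>
    intro i acc hn
    rw [trouveLoop, dif_neg (by omega)]
    exact Or.inl ⟨rfl, fun k hk hpre => absurd (occ_lt hpre hm) (by omega)⟩
  | succ n ih =>
    intro i acc hn
    rw [trouveLoop]
    by_cases hi : i < s.length
    · rw [dif_pos hi]
      by_cases hin : PySem.Chars.isIn mot (s.drop i) = true
      · rw [if_pos hin]
        have hinf : mot <:+: s.drop i := (PySem.Chars.isIn_iff_infix _ _).mp hin
        have hnn : 0 ≤ PySem.Chars.find (s.drop i) mot :=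
          (PySem.Chars.find_nonneg_iff _ _).mpr hinf
        obtain ⟨hpre, hmin⟩ := PySem.Chars.find_spec hnn
        set t := (PySem.Chars.find (s.drop i) mot).toNat with ht
        have hocc : mot <+: s.drop (t + i) := by
          rw [List.drop_drop, Nat.add_comm] at hpre; exact hpre
        have hrec := ih (t + i + 1) (acc ++ [t + i]) (by omega)
        rcases hrec with ⟨he, hnone⟩ | ⟨m, hm1, hm2, hm3, hm4⟩
        · refine Or.inr ⟨t + i, hocc, by omega, ?_, ?_⟩
          · intro k hk; exact hnone k (by omega)
          · rw [he]; simp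
        · exact Or.inr ⟨m, hm1, by omega, hm3, hm4⟩
      · rw [if_neg hin]
        refine Or.inl ⟨rfl, fun k hk hc => ?_⟩
        have hms : mot <+: (s.drop i).drop (k - i) := by
          rw [List.drop_drop]
          have he : i + (k - i) = k := by omega
          rw [he]; exact hc
        have h2 : (s.drop i).drop (k - i) <:+: s.drop i := (List.drop_suffix _ _).isInfix
        exact hin ((PySem.Chars.isIn_iff_infix _ _).mpr (hms.isInfix.trans h2))
    · rw [dif_neg hi]
      exact Or.inl ⟨rfl, fun k hk hpre => absurd (occ_lt hpre hm) (by omega)⟩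

lemma trouveLoop_head (mot s : List Char) :
    ∀ n i x acc, s.length - i ≤ n →
      (trouveLoop mot s i (x :: acc)).head? = some x := by
  intro n
  induction n with
  | zero =>
    intro i x acc hn
    rw [trouveLoop, dif_neg (by omega)]
    rfl
  | succ n ih =>
    intro i x acc hn
    rw [trouveLoop]
    by_cases hi : i < s.length
    · rw [dif_pos hi]
      by_cases hin : PySem.Chars.isIn mot (s.drop i) = true
      · rw [if_pos hin, List.cons_append]
        exact ih _ x _ (by omega)
      · rw [if_neg hin]; rfl
    · rw [dif_neg hi]; rfl

-- trouve(mot, s)[-1], as an Int, is rindex when it exists, else the IndexError case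
lemma trouve_last (mot s : List Char) (hm : mot ≠ []) :
    (trouve mot s).getLast?.map (fun d : Nat => (d : Int)) =
      if PySem.Chars.rfind s mot = -1 then none else some (PySem.Chars.rfind s mot) := by
  rcases trouveLoop_last mot s hm s.length 0 [] (by omega) with ⟨he, hnone⟩ | ⟨m, hm1, _, hm3, hm4⟩
  · have hr : PySem.Chars.rfind s mot = -1 := by
      unfold PySem.Chars.rfind
      exact rfind_go_eq_neg_one s mot s.length (fun k _ => hnone k (Nat.zero_le k))
    rw [hr]
    unfold trouve
    rw [he]
    simp
  · have hr : PySem.Chars.rfind s mot = (m : Int) := by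
      unfold PySem.Chars.rfind
      exact rfind_go_eq_of s mot m hm1 s.length (Nat.le_of_lt (occ_lt hm1 hm))
        (fun k hk _ => hm3 k hk)
    rw [hr, if_neg (by omega)]
    unfold trouve
    rw [hm4]
    simp

-- trouve(mot, s)[0], as an Int, is index when it exists, else the IndexError case
lemma trouve_head (mot s : List Char) (hm : mot ≠ []) :
    (trouve mot s).head?.map (fun d : Nat => (d : Int)) =
      if PySem.Chars.find s mot = -1 then none else some (PySem.Chars.find s mot) := by
  unfold trouve
  rw [trouveLoop]
  by_cases h0 : 0 < s.length
  · rw [dif_pos h0, List.drop_zero]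
    by_cases hf : PySem.Chars.find s mot = -1
    · have hin : ¬ PySem.Chars.isIn mot s = true := by
        simp [PySem.Chars.isIn, hf]
      rw [if_neg hin, hf]
      simp
    · have hin : PySem.Chars.isIn mot s = true := by
        simp [PySem.Chars.isIn, hf]
      rw [if_pos hin]
      have hnn : 0 ≤ PySem.Chars.find s mot := by
        have := PySem.Chars.neg_one_le_find s mot
        omega
      simp only [Nat.add_zero, List.nil_append]
      rw [trouveLoop_head mot s s.length _ _ _ (by omega)]
      rw [if_neg hf]
      simp [Int.toNat_of_nonneg hnn]
  · have hs : s = [] := by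
      cases s with
      | nil => rfl
      | cons a l => simp at h0
    subst hs
    rw [dif_neg h0]
    have hf : PySem.Chars.find [] mot = -1 := by
      rw [PySem.Chars.find_eq_neg_one_iff]
      intro hc
      exact hm (List.infix_nil.mp hc)
    rw [hf]
    simp

-- the two per-element bodies agree, for every accumulator and every index
lemma step_eq (result : String) (acc : List String) (i : Int) :
    (match (trouve (['[', '\"', 'h', 't', 't', 'p']) (PySem.List.slice result.toList (some (i - 200)) (some i))).getLast? with
     | none => acc
     | some d =>
       let indice_debut : Int := (d : Int) + i - 200 + 2
       match (trouve (['\"']) (PySem.List.slice result.toList (some i) (some (i + 5)))).head? with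
       | none => acc
       | some f =>
         let indice_fin : Int := (f : Int) + i
         let url := PySem.List.slice result.toList (some indice_debut) (some indice_fin)
         if url ≠ [] then acc ++ [String.ofList url] else acc) =
    (let r := PySem.Chars.rfind (PySem.List.slice result.toList (some (i - 200)) (some i)) (['[', '\"', 'h', 't', 't', 'p'])
     if r = -1 then acc
     else
       let indice_debut : Int := r + i - 200 + 2
       let f := PySem.Chars.find (PySem.List.slice result.toList (some i) (some (i + 5))) (['\"'])
       if f = -1 then acc
       else
         let indice_fin : Int := f + i
         let url := PySem.List.slice result.toList (some indice_debut) (some indice_fin)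
         if url ≠ [] then acc ++ [String.ofList url] else acc) := by
  have hL := trouve_last (['[', '\"', 'h', 't', 't', 'p']) (PySem.List.slice result.toList (some (i - 200)) (some i)) (by decide)
  have hH := trouve_head (['\"']) (PySem.List.slice result.toList (some i) (some (i + 5))) (by decide)
  cases hcaseL : (trouve (['[', '\"', 'h', 't', 't', 'p']) (PySem.List.slice result.toList (some (i - 200)) (some i))).getLast? with
  | none =>
    rw [hcaseL] at hL
    simp only [Option.map_none] at hL
    have hr : PySem.Chars.rfind (PySem.List.slice result.toList (some (i - 200)) (some i)) (['[', '\"', 'h', 't', 't', 'p']) = -1 := by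
      by_contra hc
      rw [if_neg hc] at hL
      simp at hL
    simp [hr]
  | some d =>
    rw [hcaseL] at hL
    simp only [Option.map_some] at hL
    have hrne : ¬ PySem.Chars.rfind (PySem.List.slice result.toList (some (i - 200)) (some i)) (['[', '\"', 'h', 't', 't', 'p']) = -1 := by
      intro hc
      rw [if_pos hc] at hL
      simp at hL
    rw [if_neg hrne] at hL
    have hr : PySem.Chars.rfind (PySem.List.slice result.toList (some (i - 200)) (some i)) (['[', '\"', 'h', 't', 't', 'p']) = (d : Int) :=
      (Option.some.inj hL).symm
    have hd : ¬ ((d : Int) = -1) := by omega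
    cases hcaseH : (trouve (['\"']) (PySem.List.slice result.toList (some i) (some (i + 5)))).head? with
    | none =>
      rw [hcaseH] at hH
      simp only [Option.map_none] at hH
      have hf : PySem.Chars.find (PySem.List.slice result.toList (some i) (some (i + 5))) (['\"']) = -1 := by
        by_contra hc
        rw [if_neg hc] at hH
        simp at hH
      simp [hr, hd, hf]
    | some f =>
      rw [hcaseH] at hH
      simp only [Option.map_some] at hH
      have hfne : ¬ PySem.Chars.find (PySem.List.slice result.toList (some i) (some (i + 5))) (['\"']) = -1 := by
        intro hc
        rw [if_pos hc] at hH
        simp at hH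
      rw [if_neg hfne] at hH
      have hf : PySem.Chars.find (PySem.List.slice result.toList (some i) (some (i + 5))) (['\"']) = (f : Int) :=
        (Option.some.inj hH).symm
      have hff : ¬ ((f : Int) = -1) := by omega
      simp [hr, hd, hf, hff]

-- ===== VERDICT (by name: the statement is the Claim_ definition above) =====
theorem sanatize_spec : Claim_equal_sanatize := by
  intro liste_indice result _
  unfold Spec_sanatize sanatize sanatize_alt
  congr 1
  funext acc i
  exact step_eq result acc i
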